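-- pv_equiv track=rewrite | github.com/rabbitbone/rabbitbone | scripts/make_live_iso.py | fat_long_name_supported
-- ===== SOURCE A (Python) =====
-- FAT_NAME_ALLOWED = set("ABCDEFGHIJKLMNOPQRSTUVWXYZ0123456789_$~!#%&-{}()@'`^")
--
-- def fat_long_name_supported(name: str) -> bool:
--     try:
--         name.encode("ascii")
--     except UnicodeEncodeError:
--         return False
--     if not name or len(name) > 255 or name[0] == "." or name[-1] in (" ", "."):
--         return False
--     return all((c in FAT_NAME_ALLOWED) or c == "." for c in name.upper())
-- ===== SOURCE B (Python) =====
-- # Same check via length-range + edge guards + a single set-inclusion test over the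
-- # distinct characters (mixed-case allowed set, no per-character upper-casing loop).
-- FAT_LONG_CHARS = frozenset(
--     "ABCDEFGHIJKLMNOPQRSTUVWXYZabcdefghijklmnopqrstuvwxyz"
--     "0123456789_$~!#%&-{}()@'`^."
-- )
--
-- def fat_long_name_supported(name: str) -> bool:
--     if not 1 <= len(name) <= 255:
--         return False
--     if name.startswith(".") or name.endswith("."):
--         return False
--     return set(name) <= FAT_LONG_CHARS
-- ===== Notes on version B (the rewrite author's own statement) =====
-- stated objective: alternative
-- what changed: Replaces the per-character upper()-then-membership all() loop (plus a separate last-char-in-(' ','.') guard) by length-range and leading/trailing-dot guards followed by a single set-inclusion test of the string's distinct characters against a precomputed mixed-case allowed set.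
import Mathlib
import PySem

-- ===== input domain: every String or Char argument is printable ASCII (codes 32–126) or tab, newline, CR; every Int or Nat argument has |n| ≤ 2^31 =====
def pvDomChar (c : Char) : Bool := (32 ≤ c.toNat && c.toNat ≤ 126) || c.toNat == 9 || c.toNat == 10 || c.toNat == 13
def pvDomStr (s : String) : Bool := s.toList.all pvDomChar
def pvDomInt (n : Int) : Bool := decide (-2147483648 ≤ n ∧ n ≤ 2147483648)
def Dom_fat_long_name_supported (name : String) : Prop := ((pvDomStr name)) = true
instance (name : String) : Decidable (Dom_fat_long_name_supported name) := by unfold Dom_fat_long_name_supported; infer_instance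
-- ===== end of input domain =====

-- B replaces the per-character upper()+membership loop by one set-inclusion test of the
-- string's distinct characters against a mixed-case allowed set (objective: alternative).

-- ===== PORT A =====
def FAT_NAME_ALLOWED : PySem.Set Char :=
  PySem.Set.ofList "ABCDEFGHIJKLMNOPQRSTUVWXYZ0123456789_$~!#%&-{}()@'`^".toList

def fat_long_name_supported (name : String) : Bool :=
  -- name.encode("ascii") raises UnicodeEncodeError exactly when some char has code ≥ 128
  if !(name.toList.all fun c => c.toNat < 128) then false
  else
    match name.toList with
    | [] => false       -- 'not name'
    | c :: cs =>        -- name[0] = c, name[-1] = cs.getLastD c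
      if decide (name.toList.length > 255) || c == '.' ||
         (cs.getLastD c == ' ' || cs.getLastD c == '.') then false
      else (PySem.Str.upper name).toList.all
             (fun x => PySem.Set.contains FAT_NAME_ALLOWED x || x == '.')

-- ===== PORT B =====
def FAT_LONG_CHARS : PySem.Set Char :=
  PySem.Set.ofList ("ABCDEFGHIJKLMNOPQRSTUVWXYZabcdefghijklmnopqrstuvwxyz0123456789_$~!#%&-{}()@'`^.").toList

def fat_long_name_supported_alt (name : String) : Bool :=
  if !(decide (1 ≤ PySem.Str.len name) && decide (PySem.Str.len name ≤ 255)) then false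
  else if PySem.Str.startswith name "." || PySem.Str.endswith name "." then false
  else PySem.Set.issubset (PySem.Set.ofList name.toList) FAT_LONG_CHARS

-- ===== PRECONDITION & SPEC =====
def Spec_fat_long_name_supported (name : String) (out : Bool) : Prop := out = fat_long_name_supported_alt name
instance (name : String) (out : Bool) : Decidable (Spec_fat_long_name_supported name out) := by unfold Spec_fat_long_name_supported; infer_instance

-- ===== CLAIM (what is proved, stated in full; the proofs are below) =====
def Claim_equal_fat_long_name_supported : Prop := ∀ (name : String), Dom_fat_long_name_supported name → Spec_fat_long_name_supported name (fat_long_name_supported name)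

-- ===== LEMMAS AND PROOFS =====

-- character-level bridge: for ASCII c, "upper(c) allowed-or-dot" = "c in the mixed-case set"
set_option maxRecDepth 4000 in
lemma pv_char_bridge (c : Char) (h : c.toNat < 128) :
    (PySem.Set.contains FAT_NAME_ALLOWED (PySem.Chars.upperChar c) || (PySem.Chars.upperChar c == '.'))
      = PySem.Set.contains FAT_LONG_CHARS c := by
  have haux : ∀ n ∈ List.range 128,
      (PySem.Set.contains FAT_NAME_ALLOWED (PySem.Chars.upperChar (Char.ofNat n)) ||
        (PySem.Chars.upperChar (Char.ofNat n) == '.'))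
        = PySem.Set.contains FAT_LONG_CHARS (Char.ofNat n) := by decide
  have := haux c.toNat (List.mem_range.mpr h)
  rwa [Char.ofNat_toNat] at this

lemma pv_suffix_singleton (x : Char) (l : List Char) :
    ([x] <:+ l) ↔ l.getLast? = some x := by
  induction l with
  | nil => simp
  | cons c cs ih =>
    cases cs with
    | nil => simp [List.suffix_cons_iff, eq_comm]
    | cons d ds => simp [List.suffix_cons_iff, List.getLast?_cons_cons] at ih ⊢; exact ih

-- ===== VERDICT (by name: the statement is the Claim_ definition above) =====
lemma pv_getLast?_cons (c : Char) (cs : List Char) :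
    (c :: cs).getLast? = some (cs.getLastD c) := by
  induction cs generalizing c with
  | nil => rfl
  | cons d ds ih => rw [List.getLast?_cons_cons, ih, List.getLastD_cons]

lemma pv_prefix_singleton (x : Char) (c : Char) (cs : List Char) :
    ([x] <+: c :: cs) ↔ c = x := by
  simp [List.cons_prefix_cons, eq_comm]

set_option maxRecDepth 4000 in
theorem fat_long_name_supported_spec : Claim_equal_fat_long_name_supported := by
  intro name hdom
  unfold Spec_fat_long_name_supported
  have hdomc : ∀ c ∈ name.toList, c.toNat < 128 := by
    unfold Dom_fat_long_name_supported pvDomStr at hdom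
    intro c hc
    have h := (List.all_eq_true.mp hdom) c hc
    simp [pvDomChar] at h
    omega
  have hascii : (name.toList.all fun c => decide (c.toNat < 128)) = true := by
    simp only [List.all_eq_true, decide_eq_true_eq]; exact hdomc
  unfold fat_long_name_supported fat_long_name_supported_alt
  cases hl : name.toList with
  | nil =>
    simp [hl, PySem.Str.len]
  | cons c cs =>
    rw [hl] at hascii hdomc
    simp only [hascii, Bool.not_true, Bool.false_eq_true, if_false]
    have hdot : ".".toList = ['.'] := by decide
    have hstart : PySem.Str.startswith name "." = (c == '.') := by
      rw [Bool.eq_iff_iff, PySem.Str.startswith_eq, hdot, hl, PySem.Chars.startswith_iff,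
        pv_prefix_singleton]
      simp
    have hend : PySem.Str.endswith name "." = (cs.getLastD c == '.') := by
      rw [Bool.eq_iff_iff, PySem.Str.endswith_eq, hdot, hl, PySem.Chars.endswith_iff,
        pv_suffix_singleton, pv_getLast?_cons]
      simp
    have hlen : PySem.Str.len name = ((c :: cs).length : Int) := by
      rw [PySem.Str.len_eq, hl]
    rw [hstart, hend, hlen]
    by_cases h255 : (c :: cs).length ≤ 255
    · have h255' : ¬ ((c :: cs).length > 255) := by omega
      have h1 : 1 ≤ (c :: cs).length := by simp
      by_cases hc : c = '.'
      · simp [hc]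
      · simp only [List.getLastD_eq_getLast?] at hstart hend ⊢
        by_cases hld : cs.getLast?.getD c = '.'
        · simp [hld]
        · by_cases hsp : cs.getLast?.getD c = ' '
          · have hmem : cs.getLast?.getD c ∈ c :: cs := by
              rw [← List.getLastD_eq_getLast?]; exact List.getLastD_mem_cons
            have hsub : (PySem.Set.ofList (c :: cs)).issubset FAT_LONG_CHARS = false := by
              rw [Bool.eq_false_iff]
              intro h
              have := ((PySem.Set.issubset_iff _ _).mp h) (cs.getLast?.getD c) ((PySem.Set.mem_ofList _ _).mpr hmem)
              rw [hsp] at this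
              revert this
              decide
            simp [hsp, hc, hsub]
          · have hup : (PySem.Str.upper name).toList = (c :: cs).map PySem.Chars.upperChar := by
              rw [PySem.Str.toList_upper, hl]
              simp [PySem.Chars.upper]
            have h2 : ((c :: cs).length : Int) ≤ 255 := by exact_mod_cast h255
            have h3 : (1 : Int) ≤ ((c :: cs).length : Int) := by exact_mod_cast h1
            simp only [hup, List.all_map, h2, h3, decide_true, Bool.and_self, Bool.not_true,
              Bool.false_eq_true, if_false]
            have hA : (decide ((c :: cs).length > 255) || c == '.' || (cs.getLast?.getD c == ' ' || cs.getLast?.getD c == '.')) = false := by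
              simp only [List.length_cons] at h255 ⊢
              simp [hc, hsp, hld]
              omega
            have hB : (c == '.' || cs.getLast?.getD c == '.') = false := by simp [hc, hld]
            rw [hA, hB]
            simp only [Bool.false_eq_true, if_false]
            rw [Bool.eq_iff_iff, List.all_eq_true, PySem.Set.issubset_iff]
            constructor
            · intro h x hx
              have hx' := (PySem.Set.mem_ofList _ _).mp hx
              have hh := h x hx'
              simp only [Function.comp] at hh
              rw [← PySem.Set.contains_iff, ← pv_char_bridge x (hdomc x hx')]
              simpa using hh
            · intro h x hx
              have hh := h x ((PySem.Set.mem_ofList _ _).mpr hx)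
              simp only [Function.comp]
              have hb := pv_char_bridge x (hdomc x hx)
              rw [← PySem.Set.contains_iff] at hh
              rw [← hb] at hh
              simpa using hh
    · have h4 : 255 ≤ cs.length := by simp only [List.length_cons] at h255; omega
      simp [h4]
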